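-- pv_equiv track=rewrite | github.com/isaac9031/LeetCode-Practice | galvanize/horizontal_bar.py | horizontal_bar_chart
-- ===== SOURCE A (Python) =====
-- def horizontal_bar_chart(sentence):
--     lista = [] #need to return a list
--     letterN = {}
--     sentence = sorted(sentence)
--     for l in sentence: #need to go over string
--         if l != " ":
--             if l not in letterN:
--                 letterN[l] = 0
--             letterN[l] +=1
--     #will get {letter:#of times its in the array}
--     for key, value in letterN.items():
--         lista.append(key*value)
--     return lista
-- ===== SOURCE B (Python) =====
-- def horizontal_bar_chart(sentence):
--     # Sort once, then scan consecutive runs of equal characters (run-length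
--     # grouping) instead of maintaining a dict with membership tests.
--     chars = sorted(sentence)
--     result = []
--     i = 0
--     n = len(chars)
--     while i < n:
--         j = i + 1
--         while j < n and chars[j] == chars[i]:
--             j += 1
--         if chars[i] != " ":
--             result.append(chars[i] * (j - i))
--         i = j
--     return result
-- ===== Notes on version B (the rewrite author's own statement) =====
-- stated objective: alternative
-- what changed: Replaces the dict of counts (membership test, insert-zero, increment, then an items pass) by a single run-length scan over the sorted characters: each maximal run of equal characters directly yields one repeated-character string.
import Mathlib
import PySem

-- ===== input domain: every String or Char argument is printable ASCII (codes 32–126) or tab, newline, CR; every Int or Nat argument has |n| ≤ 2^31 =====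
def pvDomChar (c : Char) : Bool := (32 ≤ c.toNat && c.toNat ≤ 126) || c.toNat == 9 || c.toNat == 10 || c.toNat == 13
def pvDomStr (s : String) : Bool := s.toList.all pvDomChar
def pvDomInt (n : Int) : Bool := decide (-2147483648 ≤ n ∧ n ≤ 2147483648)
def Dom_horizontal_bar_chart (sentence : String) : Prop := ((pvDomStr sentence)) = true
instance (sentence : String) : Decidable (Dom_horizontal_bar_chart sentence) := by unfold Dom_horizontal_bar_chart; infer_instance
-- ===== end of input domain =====

-- B replaces A's dict of per-letter counts by a run-length scan over the sorted characters (alternative structure, same cost).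

-- ===== PORT A =====
def horizontal_bar_chart (sentence : String) : List String :=
  let sorted := PySem.List.sorted sentence.toList (fun c => c) false
  let letterN : PySem.Dict Char Int := sorted.foldl
    (fun d l =>
      if l ≠ ' ' then
        let d := if d.contains l then d else d.insert l 0   -- if l not in letterN: letterN[l] = 0
        d.modify l 0 (· + 1)                                -- letterN[l] += 1 (the key is present here)
      else d)
    PySem.Dict.empty
  letterN.items.map (fun kv => String.ofList (List.replicate kv.2.toNat kv.1))  -- key*value

-- ===== PORT B =====
-- the outer while loop of Source B: one entry (char, run length) per maximal run of equal chars
def pvRuns : List Char → List (Char × Nat)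
  | [] => []
  | c :: rest =>
      (c, (rest.takeWhile (· == c)).length + 1) :: pvRuns (rest.dropWhile (· == c))
  termination_by l => l.length
  decreasing_by simpa using Nat.lt_succ_of_le (List.length_dropWhile_le _ _)

def horizontal_bar_chart_alt (sentence : String) : List String :=
  (pvRuns (PySem.List.sorted sentence.toList (fun c => c) false)).filterMap
    (fun r => if r.1 ≠ ' ' then some (String.ofList (List.replicate r.2 r.1)) else none)

-- ===== PRECONDITION & SPEC =====
def Spec_horizontal_bar_chart (sentence : String) (out : List String) : Prop := out = horizontal_bar_chart_alt sentence
instance (sentence : String) (out : List String) : Decidable (Spec_horizontal_bar_chart sentence out) := by unfold Spec_horizontal_bar_chart; infer_instance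

-- ===== CLAIM (what is proved, stated in full; the proofs are below) =====
def Claim_equal_horizontal_bar_chart : Prop := ∀ (sentence : String), Dom_horizontal_bar_chart sentence → Spec_horizontal_bar_chart sentence (horizontal_bar_chart sentence)

-- ===== LEMMAS AND PROOFS =====

-- removing non-p elements first does not change a p-filter when done twice
theorem pv_filter_filter {α : Type} (p q : α → Bool) (l : List α)
    (h : ∀ x, p x = true → q x = true) :
    (l.filter q).filter p = l.filter p := by
  induction l with
  | nil => rfl
  | cons x xs ih =>
    by_cases hp : p x = true
    · simp [h x hp, hp, ih]
    · by_cases hq : q x = true <;>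
        simp [hq, hp, ih]

-- set(filter) = filter(set)
theorem pv_ofList_filter {α : Type} [BEq α] [LawfulBEq α] (p : α → Bool) (xs : List α) :
    PySem.Set.ofList (xs.filter p) = (PySem.Set.ofList xs).filter p := by
  induction xs with
  | nil => simp [PySem.Set.ofList, PySem.Set.empty]
  | cons x xs ih =>
    by_cases hp : p x = true
    · rw [List.filter_cons, if_pos hp, PySem.Set.ofList_cons, PySem.Set.ofList_cons]
      simp only [PySem.Set.discard, ih, List.filter_filter, List.filter_cons, hp, if_pos]
      congr 1
      apply List.filter_congr
      intro y _
      exact Bool.and_comm _ _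
    · rw [List.filter_cons, if_neg hp, PySem.Set.ofList_cons, ih, List.filter_cons, if_neg hp]
      simp only [PySem.Set.discard]
      rw [pv_filter_filter]
      intro y hy
      simp only [Bool.not_eq_true']
      rw [beq_eq_false_iff_ne]
      intro hcon
      subst hcon
      exact hp hy

-- A's "insert 0 if missing, then increment" is one modify step
theorem pv_step_eq (d : PySem.Dict Char Int) (l : Char) :
    (if d.contains l then d else d.insert l 0).modify l 0 (· + 1) = d.modify l 0 (· + 1) := by
  by_cases h : d.contains l = true
  · simp [h]
  · have hget : d.get? l = none :=
      (PySem.Dict.get?_eq_none_iff_contains d l).mpr (by simpa using h)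
    simp [h, PySem.Dict.modify, PySem.Dict.insert_insert_self,
      PySem.Dict.getD, hget]

-- A's loop is Counter of the non-space characters
theorem pv_fold_eq (s : List Char) : ∀ d : PySem.Dict Char Int,
    s.foldl (fun d l =>
      if l ≠ ' ' then
        (if d.contains l then d else d.insert l 0).modify l 0 (· + 1)
      else d) d
    = (s.filter (fun l => decide (l ≠ ' '))).foldl (fun d x => d.modify x 0 (· + 1)) d := by
  induction s with
  | nil => intro d; rfl
  | cons x xs ih =>
    intro d
    rw [List.foldl_cons, List.filter_cons]
    by_cases hx : x = ' '
    · rw [if_neg (show ¬ x ≠ ' ' from fun h => h hx),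
        if_neg (show ¬ decide (x ≠ ' ') = true by simp [hx])]
      exact ih d
    · rw [if_pos hx, pv_step_eq, if_pos (decide_eq_true hx), List.foldl_cons]
      exact ih _

-- run-length scan of a sorted list = first occurrences paired with total counts
theorem pv_runs_spec : ∀ s : List Char, s.Pairwise (· ≤ ·) →
    pvRuns s = (PySem.Set.ofList s).map (fun c => (c, s.count c)) := by
  intro s
  induction s using pvRuns.induct with
  | case1 => intro _; simp [pvRuns, PySem.Set.ofList, PySem.Set.empty]
  | case2 c rest ih =>
    intro hp
    have hpr : rest.Pairwise (· ≤ ·) := hp.of_cons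
    have hple : ∀ x ∈ rest, c ≤ x := fun x hx => List.rel_of_pairwise_cons hp hx
    have hpu : (rest.dropWhile (· == c)).Pairwise (· ≤ ·) :=
      hpr.sublist (List.dropWhile_sublist _)
    have htc : ∀ x ∈ rest.takeWhile (· == c), x = c := by
      intro x hx
      simpa using List.mem_takeWhile_imp hx
    have hcu : c ∉ rest.dropWhile (· == c) := by
      cases hu : rest.dropWhile (· == c) with
      | nil => simp
      | cons y v =>
        have hy : ¬ (y == c) = true := by
          have := List.head?_dropWhile_not (· == c) rest
          rw [hu] at this
          simpa using this
        have hyne : y ≠ c := by simpa using hy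
        have hymem : y ∈ rest := (List.dropWhile_sublist (· == c)).subset (hu ▸ List.mem_cons_self)
        have hcy : c ≤ y := hple y hymem
        have hcylt : c < y := lt_of_le_of_ne hcy (Ne.symm hyne)
        intro hmem
        rcases List.mem_cons.mp hmem with h1 | h2
        · exact hyne h1.symm
        · have hpuy := hu ▸ hpu
          have : y ≤ c := List.rel_of_pairwise_cons hpuy h2
          exact absurd this (not_le.mpr hcylt)
    have hsplit : rest.takeWhile (· == c) ++ rest.dropWhile (· == c) = rest :=
      List.takeWhile_append_dropWhile
    have hcount_t : (rest.takeWhile (· == c)).count c = (rest.takeWhile (· == c)).length := by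
      apply List.count_eq_length.mpr
      intro x hx
      exact (htc x hx).symm
    have hcount_u : (rest.dropWhile (· == c)).count c = 0 :=
      List.count_eq_zero.mpr hcu
    have hfilter_t : (rest.takeWhile (· == c)).filter (fun y => !(y == c)) = [] := by
      apply List.filter_eq_nil_iff.mpr
      intro x hx
      simp [htc x hx]
    have hfilter_u : (rest.dropWhile (· == c)).filter (fun y => !(y == c)) =
        rest.dropWhile (· == c) := by
      apply List.filter_eq_self.mpr
      intro x hx
      simp
      intro hcon
      exact hcu (hcon ▸ hx)
    have hrestf : rest.filter (fun y => !(y == c)) = rest.dropWhile (· == c) := by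
      conv_lhs => rw [← hsplit]
      rw [List.filter_append, hfilter_t, hfilter_u, List.nil_append]
    have hcrest : rest.count c = (rest.takeWhile (· == c)).length := by
      conv_lhs => rw [← hsplit]
      rw [List.count_append, hcount_t, hcount_u]
      omega
    have hofl : PySem.Set.ofList (c :: rest)
        = c :: PySem.Set.ofList (rest.dropWhile (· == c)) := by
      rw [PySem.Set.ofList_cons]
      congr 1
      simp only [PySem.Set.discard]
      rw [← pv_ofList_filter, hrestf]
    rw [pvRuns, hofl, List.map_cons]
    congr 1
    · -- head: count of c in the whole list is the first run's length + 1
      have : (c :: rest).count c = (rest.takeWhile (· == c)).length + 1 := by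
        rw [List.count_cons_self, hcrest]
      rw [this]
    · -- tail: counts in the remainder agree with counts in the whole list
      rw [ih hpu]
      apply List.map_congr_left
      intro x hx
      have hxu : x ∈ rest.dropWhile (· == c) := by
        exact (PySem.Set.mem_ofList _ _).mp hx
      have hxc : x ≠ c := fun h => hcu (h ▸ hxu)
      have hxt : x ∉ rest.takeWhile (· == c) := fun h => hxc (htc x h)
      have hxrest : rest.count x = (rest.dropWhile (· == c)).count x := by
        conv_lhs => rw [← hsplit]
        rw [List.count_append, List.count_eq_zero.mpr hxt, Nat.zero_add]
      have : (c :: rest).count x = (rest.dropWhile (· == c)).count x := by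
        rw [List.count_cons_of_ne (Ne.symm hxc), hxrest]
      rw [this]

-- filterMap with an if-guard is filter-then-map
theorem pv_filterMap_guard {α β : Type} (p : α → Bool) (f : α → β) (l : List α) :
    l.filterMap (fun x => if p x then some (f x) else none) = (l.filter p).map f := by
  induction l with
  | nil => rfl
  | cons x xs ih =>
    by_cases hp : p x = true <;> simp [hp, ih]

-- ===== VERDICT (by name: the statement is the Claim_ definition above) =====
theorem horizontal_bar_chart_spec : Claim_equal_horizontal_bar_chart := by
  intro sentence _
  unfold Spec_horizontal_bar_chart horizontal_bar_chart horizontal_bar_chart_alt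
  dsimp only
  set s := PySem.List.sorted sentence.toList (fun c => c) false with hs
  have hpair : s.Pairwise (· ≤ ·) := PySem.List.sorted_pairwise sentence.toList (fun c => c)
  -- A side: the loop is Counter of the filtered characters
  rw [pv_fold_eq, ← PySem.Dict.counter_eq_foldl, PySem.Dict.items_counter, List.map_map]
  -- B side: runs of a sorted list, then the guard becomes filter-then-map
  rw [pv_runs_spec s hpair,
    show (fun r : Char × Nat => if r.1 ≠ ' ' then some (String.ofList (List.replicate r.2 r.1)) else none)
       = (fun r : Char × Nat => if (fun q : Char × Nat => decide (q.1 ≠ ' ')) r = true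
            then some ((fun q : Char × Nat => String.ofList (List.replicate q.2 q.1)) r) else none)
      from by funext r; simp,
    pv_filterMap_guard, List.filter_map, List.map_map]
  have hpred : ((fun q : Char × Nat => decide (q.1 ≠ ' ')) ∘ fun c => (c, s.count c))
      = (fun l : Char => decide (l ≠ ' ')) := by funext c; rfl
  rw [hpred, ← pv_ofList_filter]
  apply List.map_congr_left
  intro c hc
  have hcm : c ∈ s.filter (fun l => decide (l ≠ ' ')) :=
    (PySem.Set.mem_ofList _ _).mp hc
  have hcp : (fun l : Char => decide (l ≠ ' ')) c = true := (List.mem_filter.mp hcm).2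
  simp only [Function.comp_apply]
  rw [List.count_filter (p := fun l : Char => decide (l ≠ ' ')) (a := c) (l := s) hcp]
  simp
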